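-- pv_equiv track=rewrite | github.com/PostHog/posthog | posthog/api/cohort.py | _find_id_column
-- ===== SOURCE A (Python) =====
-- class CSVConfig:
--     """Configuration constants for CSV processing"""
--
--     PERSON_ID_HEADERS = ["person_id", "person-id", "Person .id"]
--     DISTINCT_ID_HEADERS = ["distinct_id", "distinct-id"]
--     EMAIL_HEADERS = ["email", "e-mail"]
--     ENCODING = "utf-8"
--
--     class ErrorMessages:
--         EMPTY_FILE = "CSV file is empty. Please upload a CSV file with at least one row of data."
--         MISSING_ID_COLUMN = "Multi-column CSV must contain at least one column with a supported ID header: 'person_id', 'Person .id' (PostHog export format), 'distinct_id', 'distinct-id', or 'email'. Found columns: {columns}"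
--         NO_VALID_IDS = "CSV file contains no valid person IDs, distinct IDs, or email addresses. Please ensure your file has data rows with person IDs, distinct IDs, or email addresses."
--         ENCODING_ERROR = "CSV file encoding is not supported. Please save your file as UTF-8 and try again."
--         FORMAT_ERROR = "CSV file format is invalid. Please check your file format and try again."
--         GENERIC_ERROR = "An error occurred while processing your CSV file. Please try again or contact support if the problem persists."
--
-- def _find_id_column(headers: list[str]) -> tuple[int, str] | None:
--     """Find the index and type of the ID column in headers, with preference order: person_id > distinct_id > email"""
--     normalized_headers = [h.strip() for h in headers]
--     normalized_lower_headers = [h.lower() for h in normalized_headers]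
--
--     # First, look for person_id columns (preferred) - use case-insensitive matching
--     person_id_headers_lower = [h.lower() for h in CSVConfig.PERSON_ID_HEADERS]
--     for i, header in enumerate(normalized_lower_headers):
--         if header in person_id_headers_lower:
--             return i, "person_id"
--
--     # Then, look for distinct_id columns
--     for i, header in enumerate(normalized_lower_headers):
--         if header in CSVConfig.DISTINCT_ID_HEADERS:
--             return i, "distinct_id"
--
--     # Finally, look for email columns
--     email_headers_lower = [h.lower() for h in CSVConfig.EMAIL_HEADERS]
--     for i, header in enumerate(normalized_lower_headers):
--         if header in email_headers_lower:
--             return i, "email"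
--
--     return None
-- ===== SOURCE B (Python) =====
-- def _find_id_column(headers: list[str]) -> tuple[int, str] | None:
--     """Single pass: record the first index per ID category, then pick by priority."""
--     categories = {
--         "person_id": [h.lower() for h in ["person_id", "person-id", "Person .id"]],
--         "distinct_id": ["distinct_id", "distinct-id"],
--         "email": [h.lower() for h in ["email", "e-mail"]],
--     }
--     first = {}
--     for i, h in enumerate(headers):
--         key = h.strip().lower()
--         for typ, values in categories.items():
--             if key in values:
--                 first.setdefault(typ, i)
--     for typ in ("person_id", "distinct_id", "email"):
--         if typ in first:
--             return first[typ], typ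
--     return None
-- ===== Notes on version B (the rewrite author's own statement) =====
-- stated objective: alternative
-- what changed: Replaces A's three successive enumerate-scans of the headers (one per ID category) by a single pass that records the first index per category into a dict via setdefault, followed by a priority selection person_id > distinct_id > email.
import Mathlib
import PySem

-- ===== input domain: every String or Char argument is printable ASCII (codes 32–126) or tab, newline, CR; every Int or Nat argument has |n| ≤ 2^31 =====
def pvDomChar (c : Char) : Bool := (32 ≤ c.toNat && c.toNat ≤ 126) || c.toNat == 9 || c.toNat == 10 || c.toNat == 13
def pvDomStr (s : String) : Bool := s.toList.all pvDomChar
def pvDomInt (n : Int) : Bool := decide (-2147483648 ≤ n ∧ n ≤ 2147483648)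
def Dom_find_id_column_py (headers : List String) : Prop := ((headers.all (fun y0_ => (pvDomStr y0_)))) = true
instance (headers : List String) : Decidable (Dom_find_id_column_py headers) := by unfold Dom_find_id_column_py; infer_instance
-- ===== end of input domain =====

-- B replaces A's three scans over the headers by a single pass recording the first index per
-- ID category into a dict, followed by a priority selection (objective: alternative/simpler).

-- ===== PORT A =====
def pvPersonIdHeaders : List String := ["person_id", "person-id", "Person .id"]
def pvDistinctIdHeaders : List String := ["distinct_id", "distinct-id"]
def pvEmailHeaders : List String := ["email", "e-mail"]

-- the 'for i, header in enumerate(...): if header in cat: return i' loops of A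
def pvFindIn (cat : List String) : List String → Int → Option Int
  | [], _ => none
  | h :: t, i => if h ∈ cat then some i else pvFindIn cat t (i + 1)

def find_id_column_py (headers : List String) : Option (Int × String) :=
  let normalized_headers := headers.map (fun h => PySem.Str.strip h)
  let normalized_lower_headers := normalized_headers.map (fun h => PySem.Str.lower h)
  let person_id_headers_lower := pvPersonIdHeaders.map (fun h => PySem.Str.lower h)
  match pvFindIn person_id_headers_lower normalized_lower_headers 0 with
  | some i => some (i, "person_id")
  | none =>
    match pvFindIn pvDistinctIdHeaders normalized_lower_headers 0 with
    | some i => some (i, "distinct_id")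
    | none =>
      match pvFindIn (pvEmailHeaders.map (fun h => PySem.Str.lower h)) normalized_lower_headers 0 with
      | some i => some (i, "email")
      | none => none

-- ===== PORT B =====
def pvCats : List (String × List String) :=
  [("person_id", ["person_id", "person-id", "Person .id"].map (fun h => PySem.Str.lower h)),
   ("distinct_id", ["distinct_id", "distinct-id"]),
   ("email", ["email", "e-mail"].map (fun h => PySem.Str.lower h))]

-- the single 'for i, h in enumerate(headers)' pass of B, with the inner loop over categories
def pvBuild : List String → Int → PySem.Dict String Int → PySem.Dict String Int
  | [], _, d => d
  | h :: t, i, d =>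
    let key := PySem.Str.lower (PySem.Str.strip h)
    pvBuild t (i + 1)
      (pvCats.foldl (fun d c => if c.2.contains key then PySem.Dict.setdefault d c.1 i else d) d)

def find_id_column_py_alt (headers : List String) : Option (Int × String) :=
  let first := pvBuild headers 0 PySem.Dict.empty
  match PySem.Dict.get? first "person_id" with
  | some i => some (i, "person_id")
  | none =>
    match PySem.Dict.get? first "distinct_id" with
    | some i => some (i, "distinct_id")
    | none =>
      match PySem.Dict.get? first "email" with
      | some i => some (i, "email")
      | none => none

-- ===== PRECONDITION & SPEC =====
def Spec_find_id_column_py (headers : List String) (out : Option (Int × String)) : Prop := out = find_id_column_py_alt headers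
instance (headers : List String) (out : Option (Int × String)) : Decidable (Spec_find_id_column_py headers out) := by unfold Spec_find_id_column_py; infer_instance

-- ===== CLAIM (what is proved, stated in full; the proofs are below) =====
def Claim_equal_find_id_column_py : Prop := ∀ (headers : List String), Dom_find_id_column_py headers → Spec_find_id_column_py headers (find_id_column_py headers)

-- ===== LEMMAS AND PROOFS =====

theorem get?_setdefault_self {κ ν : Type} [BEq κ] [LawfulBEq κ] (d : PySem.Dict κ ν) (k : κ) (v : ν) :
    (PySem.Dict.setdefault d k v).get? k = some ((d.get? k).getD v) := by
  unfold PySem.Dict.setdefault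
  by_cases h : d.contains k = true
  · simp only [h, if_true]
    rw [PySem.Dict.contains_eq_isSome_get?] at h
    cases hg : d.get? k with
    | none => exact absurd h (by simp [hg])
    | some w => simp
  · simp only [h]
    have : ({ items := d.items ++ [(k, v)] } : PySem.Dict κ ν) = d.insert k v := by
      apply PySem.Dict.ext
      rw [PySem.Dict.items_insert_of_not_contains _ _ (by simpa using h)]
    rw [if_neg (by simp), this, PySem.Dict.get?_insert_self]
    rw [PySem.Dict.contains_eq_isSome_get?] at h
    cases hg : d.get? k with
    | none => simp
    | some w => simp [hg] at h

theorem get?_setdefault_of_ne {κ ν : Type} [BEq κ] [LawfulBEq κ] (d : PySem.Dict κ ν) (k k' : κ) (v : ν)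
    (h : k' ≠ k) : (PySem.Dict.setdefault d k v).get? k' = d.get? k' := by
  unfold PySem.Dict.setdefault
  by_cases hc : d.contains k = true
  · simp [hc]
  · simp only [hc]
    have : ({ items := d.items ++ [(k, v)] } : PySem.Dict κ ν) = d.insert k v := by
      apply PySem.Dict.ext
      rw [PySem.Dict.items_insert_of_not_contains _ _ (by simpa using hc)]
    rw [if_neg (by simp), this, PySem.Dict.get?_insert_of_ne _ _ h]

-- the effect of B's inner loop over the three categories on the entry of one key k with list L
theorem pvStep_get (k : String) (L : List String)
    (hsel : ∀ (key : String) (d : PySem.Dict String Int) (i : Int),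
      PySem.Dict.get? (pvCats.foldl (fun d c => if c.2.contains key then PySem.Dict.setdefault d c.1 i else d) d) k
        = if key ∈ L then some ((PySem.Dict.get? d k).getD i) else PySem.Dict.get? d k) :
    ∀ (hs : List String) (i : Int) (d : PySem.Dict String Int),
      PySem.Dict.get? (pvBuild hs i d) k
        = (PySem.Dict.get? d k).or (pvFindIn L (hs.map (fun h => PySem.Str.lower (PySem.Str.strip h))) i) := by
  intro hs
  induction hs with
  | nil => intro i d; simp [pvBuild, pvFindIn]
  | cons h t ih =>
    intro i d
    simp only [pvBuild, List.map_cons, pvFindIn]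
    rw [ih, hsel]
    by_cases hm : PySem.Str.lower (PySem.Str.strip h) ∈ L
    · simp only [hm, if_true]
      cases hg : PySem.Dict.get? d k with
      | none => simp
      | some w => simp
    · simp only [hm, if_false]

theorem sel_person : ∀ (key : String) (d : PySem.Dict String Int) (i : Int),
    PySem.Dict.get? (pvCats.foldl (fun d c => if c.2.contains key then PySem.Dict.setdefault d c.1 i else d) d) "person_id"
      = if key ∈ pvPersonIdHeaders.map (fun h => PySem.Str.lower h) then some ((PySem.Dict.get? d "person_id").getD i) else PySem.Dict.get? d "person_id" := by
  intro key d i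
  simp only [pvCats, pvPersonIdHeaders, List.foldl_cons, List.foldl_nil]
  split_ifs with h1 h2 h2 h3 h3 h3 h3 <;>
    simp_all [get?_setdefault_self,
      get?_setdefault_of_ne _ _ _ _ (by decide : ("person_id" : String) ≠ "distinct_id"),
      get?_setdefault_of_ne _ _ _ _ (by decide : ("person_id" : String) ≠ "email")]

theorem sel_distinct : ∀ (key : String) (d : PySem.Dict String Int) (i : Int),
    PySem.Dict.get? (pvCats.foldl (fun d c => if c.2.contains key then PySem.Dict.setdefault d c.1 i else d) d) "distinct_id"
      = if key ∈ pvDistinctIdHeaders then some ((PySem.Dict.get? d "distinct_id").getD i) else PySem.Dict.get? d "distinct_id" := by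
  intro key d i
  simp only [pvCats, pvDistinctIdHeaders, List.foldl_cons, List.foldl_nil]
  split_ifs with h1 h2 h2 h3 h3 h3 h3 <;>
    simp_all [get?_setdefault_self,
      get?_setdefault_of_ne _ _ _ _ (by decide : ("distinct_id" : String) ≠ "person_id"),
      get?_setdefault_of_ne _ _ _ _ (by decide : ("distinct_id" : String) ≠ "email")]

theorem sel_email : ∀ (key : String) (d : PySem.Dict String Int) (i : Int),
    PySem.Dict.get? (pvCats.foldl (fun d c => if c.2.contains key then PySem.Dict.setdefault d c.1 i else d) d) "email"
      = if key ∈ pvEmailHeaders.map (fun h => PySem.Str.lower h) then some ((PySem.Dict.get? d "email").getD i) else PySem.Dict.get? d "email" := by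
  intro key d i
  simp only [pvCats, pvEmailHeaders, List.foldl_cons, List.foldl_nil]
  split_ifs with h1 h2 h2 h3 h3 h3 h3 <;>
    simp_all [get?_setdefault_self,
      get?_setdefault_of_ne _ _ _ _ (by decide : ("email" : String) ≠ "person_id"),
      get?_setdefault_of_ne _ _ _ _ (by decide : ("email" : String) ≠ "distinct_id")]

-- ===== VERDICT (by name: the statement is the Claim_ definition above) =====
theorem find_id_column_py_spec : Claim_equal_find_id_column_py := by
  intro headers _
  unfold Spec_find_id_column_py find_id_column_py find_id_column_py_alt
  simp only [List.map_map]
  rw [pvStep_get _ _ sel_person headers 0 PySem.Dict.empty,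
      pvStep_get _ _ sel_distinct headers 0 PySem.Dict.empty,
      pvStep_get _ _ sel_email headers 0 PySem.Dict.empty]
  simp [PySem.Dict.get?_empty, Function.comp_def]
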